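-- pv_equiv track=rewrite | github.com/Jinghe-John/AI_project_workflow | process_en.py | remove_title_at
-- ===== SOURCE A (Python) =====
-- def remove_title_at(data: list[dict], title_index: int) -> list[dict]:
--     """
--     Remove the title_index-th 'title' block from data in-place and return data.
--     """
--     seen = 0
--     for pos, item in enumerate(data):
--         if item.get("type") == "title":
--             if seen == title_index:
--                 data.pop(pos)
--                 return data
--             seen += 1
--     return data
-- ===== SOURCE B (Python) =====
-- def remove_title_at(data: list[dict], title_index: int) -> list[dict]:
--     positions = [i for i, item in enumerate(data) if item.get("type") == "title"]
--     if 0 <= title_index < len(positions):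
--         data.pop(positions[title_index])
--     return data
-- ===== Notes on version B (the rewrite author's own statement) =====
-- stated objective: simpler
-- what changed: Replaces the inline scan-and-count with early return by first building the full index table of title positions, then a single bounds check and one direct pop at the looked-up position.
import Mathlib
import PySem

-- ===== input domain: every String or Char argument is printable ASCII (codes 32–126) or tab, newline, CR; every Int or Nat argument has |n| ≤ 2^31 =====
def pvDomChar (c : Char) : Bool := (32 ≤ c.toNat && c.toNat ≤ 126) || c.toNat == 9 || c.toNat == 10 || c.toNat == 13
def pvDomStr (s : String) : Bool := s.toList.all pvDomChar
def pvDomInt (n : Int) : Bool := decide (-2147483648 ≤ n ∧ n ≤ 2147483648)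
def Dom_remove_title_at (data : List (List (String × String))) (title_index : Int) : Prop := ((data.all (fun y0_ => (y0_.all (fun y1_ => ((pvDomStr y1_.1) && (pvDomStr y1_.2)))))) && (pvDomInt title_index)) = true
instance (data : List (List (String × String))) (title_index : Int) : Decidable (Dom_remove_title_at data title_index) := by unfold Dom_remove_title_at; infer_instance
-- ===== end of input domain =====

-- ===== PORT A =====
-- B changes: it builds the full index table of title positions first, then does one bounds check
-- and a single direct pop at the looked-up position, instead of A's inline scan-and-count with
-- early return (objective: simpler decomposition). In Python both mutate `data` in place and
-- return the same list object; the ports model the returned value.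

-- A's loop: walk the list keeping the count `seen` of title blocks passed; on the title with
-- seen == title_index drop it (data.pop(pos) followed by an immediate return).
def remove_title_at_go (title_index seen : Int) :
    List (List (String × String)) → List (List (String × String))
  | [] => []
  | item :: rest =>
    if (PySem.Dict.mk item).get? "type" == some "title" then
      if seen == title_index then rest
      else item :: remove_title_at_go title_index (seen + 1) rest
    else item :: remove_title_at_go title_index seen rest

def remove_title_at (data : List (List (String × String))) (title_index : Int) :
    List (List (String × String)) :=
  remove_title_at_go title_index 0 data

-- ===== PORT B =====
-- the comprehension [i for i, item in enumerate(data) if item.get("type") == "title"]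
def titlePositions (data : List (List (String × String))) : List Int :=
  ((PySem.List.enumerate data 0).filter
    (fun p => (PySem.Dict.mk p.2).get? "type" == some "title")).map Prod.fst

def remove_title_at_alt (data : List (List (String × String))) (title_index : Int) :
    List (List (String × String)) :=
  let positions := titlePositions data
  if 0 ≤ title_index ∧ title_index < (positions.length : Int) then
    match PySem.List.pop? data (positions.getD title_index.toNat 0) with
    | some r => r.2   -- data.pop(i): the list with the element at index i removed
    | none => data    -- unreachable: the position is a valid index of data
  else data

-- ===== PRECONDITION & SPEC =====
def Spec_remove_title_at (data : List (List (String × String))) (title_index : Int) (out : List (List (String × String))) : Prop := out = remove_title_at_alt data title_index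
instance (data : List (List (String × String))) (title_index : Int) (out : List (List (String × String))) : Decidable (Spec_remove_title_at data title_index out) := by unfold Spec_remove_title_at; infer_instance

-- ===== CLAIM (what is proved, stated in full; the proofs are below) =====
def Claim_equal_remove_title_at : Prop := ∀ (data : List (List (String × String))) (title_index : Int), Dom_remove_title_at data title_index → Spec_remove_title_at data title_index (remove_title_at data title_index)

-- ===== LEMMAS AND PROOFS =====

-- the title test, abbreviated for the proofs
def isTitle (item : List (String × String)) : Bool :=
  (PySem.Dict.mk item).get? "type" == some "title"

-- title positions when enumeration starts at s (generalizes titlePositions for the induction)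
def posF (s : Int) (data : List (List (String × String))) : List Int :=
  ((PySem.List.enumerate data s).filter
    (fun p => (PySem.Dict.mk p.2).get? "type" == some "title")).map Prod.fst

lemma posF_zero (data : List (List (String × String))) : titlePositions data = posF 0 data := rfl

lemma go_cons (ti seen : Int) (x : List (String × String))
    (rest : List (List (String × String))) :
    remove_title_at_go ti seen (x :: rest) =
      if isTitle x then
        (if seen == ti then rest else x :: remove_title_at_go ti (seen + 1) rest)
      else x :: remove_title_at_go ti seen rest := rfl

lemma posF_cons (s : Int) (x : List (String × String)) (rest : List (List (String × String))) :
    posF s (x :: rest) = if isTitle x then s :: posF (s + 1) rest else posF (s + 1) rest := by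
  simp only [posF, PySem.List.enumerate_cons, isTitle, List.filter_cons]
  split_ifs with h <;> simp

lemma posF_nil (s : Int) : posF s [] = [] := by
  simp [posF, PySem.List.enumerate_nil]

lemma posF_shift (data : List (List (String × String))) (s : Int) :
    posF s data = (posF 0 data).map (· + s) := by
  induction data generalizing s with
  | nil => simp [posF_nil]
  | cons x rest ih =>
    rw [posF_cons, posF_cons, ih (s + 1), ih (0 + 1)]
    split_ifs with h
    · simp only [List.map_cons, List.map_map]
      congr 1
      · omega
      · exact List.map_congr_left fun a _ => by simp [Function.comp]; ring
    · simp only [List.map_map]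
      exact List.map_congr_left fun a _ => by simp [Function.comp]; ring

lemma posF_mem_bounds (data : List (List (String × String))) (p : Int) (hp : p ∈ posF 0 data) :
    0 ≤ p ∧ p.toNat < data.length := by
  induction data generalizing p with
  | nil => simp [posF_nil] at hp
  | cons x rest ih =>
    rw [posF_cons, posF_shift rest (0 + 1)] at hp
    have main : p ∈ (posF 0 rest).map (· + (0 + 1)) → 0 ≤ p ∧ p.toNat < (x :: rest).length := by
      intro hmem
      rcases List.mem_map.1 hmem with ⟨q, hq, rfl⟩
      have := ih q hq
      refine ⟨by omega, ?_⟩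
      simp only [List.length_cons]; omega
    split_ifs at hp with h
    · rcases List.mem_cons.1 hp with h0 | hmem
      · subst h0; simp
      · exact main hmem
    · exact main hp

-- A's loop only depends on title_index - seen
lemma go_eq_go_sub (data : List (List (String × String))) (ti seen : Int) :
    remove_title_at_go ti seen data = remove_title_at_go (ti - seen) 0 data := by
  induction data generalizing ti seen with
  | nil => rfl
  | cons x rest ih =>
    rw [go_cons, go_cons]
    have hb : (seen == ti) = ((0 : Int) == ti - seen) := by
      rcases eq_or_ne seen ti with he | he
      · subst he; simp
      · have h' : (0 : Int) ≠ ti - seen := by omega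
        simp [he, h']
    rw [hb]
    split_ifs with h1 h2
    · rfl
    · rw [ih ti (seen + 1), ih (ti - seen) (0 + 1)]
      have : ti - (seen + 1) = ti - seen - (0 + 1) := by ring
      rw [this]
    · rw [ih ti seen, ih (ti - seen) 0]

-- out of range (negative, or ≥ the number of titles): A's loop returns data unchanged
lemma go_out_of_range (data : List (List (String × String))) (k : Int)
    (hk : k < 0 ∨ ((posF 0 data).length : Int) ≤ k) :
    remove_title_at_go k 0 data = data := by
  induction data generalizing k with
  | nil => rfl
  | cons x rest ih =>
    rw [posF_cons] at hk
    rw [go_cons]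
    by_cases ht : isTitle x
    · simp only [ht, if_true] at hk ⊢
      have hk0 : ((0 : Int) == k) = false := by
        simp only [List.length_cons] at hk
        have : (0 : Int) ≠ k := by omega
        simp [this]
      rw [hk0]
      simp only [Bool.false_eq_true, if_false]
      rw [go_eq_go_sub rest k (0 + 1), ih (k - (0 + 1))]
      rw [posF_shift rest (0 + 1)] at hk
      simp only [List.length_cons, List.length_map] at hk
      omega
    · simp only [ht, Bool.false_eq_true, if_false] at hk ⊢
      rw [posF_shift rest (0 + 1)] at hk
      rw [ih k]
      simp only [List.length_map] at hk
      omega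

-- in range: A's loop erases exactly the k-th title position
lemma go_in_range (data : List (List (String × String))) (k : Int) (h0 : 0 ≤ k)
    (hk : k.toNat < (posF 0 data).length) :
    remove_title_at_go k 0 data = data.eraseIdx ((posF 0 data).getD k.toNat 0).toNat := by
  induction data generalizing k with
  | nil => simp [posF_nil] at hk
  | cons x rest ih =>
    rw [posF_cons] at hk ⊢
    rw [go_cons]
    by_cases ht : isTitle x
    · simp only [ht, if_true] at hk ⊢
      by_cases hk0 : k = 0
      · subst hk0; simp
      · have hbk : ((0 : Int) == k) = false := by
          have : (0 : Int) ≠ k := by omega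
          simp [this]
        rw [hbk]
        simp only [Bool.false_eq_true, if_false]
        rw [go_eq_go_sub rest k (0 + 1)]
        rw [posF_shift rest (0 + 1)] at hk
        simp only [List.length_cons, List.length_map] at hk
        have hk' : (k - (0 + 1)).toNat < (posF 0 rest).length := by omega
        rw [ih (k - (0 + 1)) (by omega) hk']
        have hkt : k.toNat = (k - (0 + 1)).toNat + 1 := by omega
        rw [hkt, List.getD_cons_succ, posF_shift rest (0 + 1)]
        have hmap : (List.map (· + (0 + 1)) (posF 0 rest)).getD (k - (0 + 1)).toNat 0
            = (posF 0 rest)[(k - (0 + 1)).toNat] + (0 + 1) := by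
          rw [List.getD_eq_getElem _ _ (by simpa using hk'), List.getElem_map]
        rw [hmap, List.getD_eq_getElem _ _ hk']
        have hp := posF_mem_bounds rest _ (List.getElem_mem (l := posF 0 rest) hk')
        have : ((posF 0 rest)[(k - (0 + 1)).toNat] + (0 + 1)).toNat
            = (posF 0 rest)[(k - (0 + 1)).toNat].toNat + 1 := by omega
        rw [this, List.eraseIdx_cons_succ]
    · simp only [ht, Bool.false_eq_true, if_false] at hk ⊢
      rw [posF_shift rest (0 + 1)] at hk ⊢
      simp only [List.length_map] at hk
      rw [ih k h0 hk]
      have hmap : (List.map (· + (0 + 1)) (posF 0 rest)).getD k.toNat 0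
          = (posF 0 rest)[k.toNat] + (0 + 1) := by
        rw [List.getD_eq_getElem _ _ (by simpa using hk), List.getElem_map]
      rw [hmap, List.getD_eq_getElem _ _ hk]
      have hp := posF_mem_bounds rest _ (List.getElem_mem (l := posF 0 rest) hk)
      have : ((posF 0 rest)[k.toNat] + (0 + 1)).toNat = (posF 0 rest)[k.toNat].toNat + 1 := by
        omega
      rw [this, List.eraseIdx_cons_succ]

-- ===== VERDICT (by name: the statement is the Claim_ definition above) =====
theorem remove_title_at_spec : Claim_equal_remove_title_at := by
  unfold Claim_equal_remove_title_at
  intro data ti _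
  unfold Spec_remove_title_at remove_title_at remove_title_at_alt
  simp only [posF_zero]
  by_cases hin : 0 ≤ ti ∧ ti < ((posF 0 data).length : Int)
  · rw [if_pos hin]
    have hlt : ti.toNat < (posF 0 data).length := by omega
    set p := (posF 0 data).getD ti.toNat 0 with hpdef
    have hmem : p ∈ posF 0 data := by
      rw [hpdef, List.getD_eq_getElem _ _ hlt]
      exact List.getElem_mem hlt
    have hb := posF_mem_bounds data p hmem
    have hcast : ((p.toNat : Int)) = p := by omega
    rw [← hcast, PySem.List.pop?_natCast data p.toNat hb.2]
    rw [go_in_range data ti hin.1 hlt]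
  · rw [if_neg hin]
    exact go_out_of_range data ti (by omega)
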